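-- pv_equiv track=rewrite | github.com/JungTag/Algorithm_Study | s2.py | is_candidate_key
-- ===== SOURCE A (Python) =====
-- def is_candidate_key(indexes, columns, ROW_LEN):
--     checked_key = set()
--
--     for row in range(ROW_LEN):
--         new_column = ""
--         for index in indexes:
--             new_column += columns[index][row]
--         checked_key.add(new_column)
--
--     if len(checked_key) == ROW_LEN:
--         return True
--     else:
--         return False
-- ===== SOURCE B (Python) =====
-- def is_candidate_key(indexes, columns, ROW_LEN):
--     keys = []
--     for row in range(ROW_LEN):
--         key = ""
--         for index in indexes:
--             key += columns[index][row]
--         keys.append(key)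
--     keys.sort()
--     for k in range(1, len(keys)):
--         if keys[k - 1] == keys[k]:
--             return False
--     return len(keys) == ROW_LEN
-- ===== Notes on version B (the rewrite author's own statement) =====
-- stated objective: alternative
-- what changed: B collects the per-row concatenated keys into a list, sorts it, and returns False on any adjacent duplicate (and checks the count equals ROW_LEN), instead of A's hash-set cardinality test.
import Mathlib
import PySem

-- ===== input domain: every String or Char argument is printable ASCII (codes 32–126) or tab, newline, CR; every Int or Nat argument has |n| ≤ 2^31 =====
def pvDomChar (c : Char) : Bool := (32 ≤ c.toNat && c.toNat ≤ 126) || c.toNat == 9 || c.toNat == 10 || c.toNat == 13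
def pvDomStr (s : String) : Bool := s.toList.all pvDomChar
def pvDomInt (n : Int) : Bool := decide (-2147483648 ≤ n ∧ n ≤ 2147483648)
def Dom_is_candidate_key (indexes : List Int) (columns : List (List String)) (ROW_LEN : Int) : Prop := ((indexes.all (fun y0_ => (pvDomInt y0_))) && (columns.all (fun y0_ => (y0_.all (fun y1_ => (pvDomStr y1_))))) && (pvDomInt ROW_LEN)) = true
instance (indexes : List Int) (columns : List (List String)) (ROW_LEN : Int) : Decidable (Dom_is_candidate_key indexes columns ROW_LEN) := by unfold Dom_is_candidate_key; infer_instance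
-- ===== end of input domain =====

-- B replaces A's hash-set uniqueness test by collect-keys, sort, and a single
-- adjacent-duplicate scan (alternative algorithm, same exact result).
-- ===== PORT A =====
-- port of A: fold the rows, concatenating the indexed cells into a key string and
-- adding it to a set; return (len(set) == ROW_LEN)
def is_candidate_key (indexes : List Int) (columns : List (List String)) (ROW_LEN : Int) : Bool :=
  let checked_key : PySem.Set String :=
    (PySem.List.pyRange 0 ROW_LEN 1).foldl
      (fun ck row =>
        PySem.Set.add ck
          (indexes.foldl
            (fun new_column index =>
              new_column ++ PySem.List.pyGetD (PySem.List.pyGetD columns index []) row "")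
            ""))
      PySem.Set.empty
  decide ((PySem.Set.len checked_key : Int) = ROW_LEN)

-- ===== PORT B =====
-- B's per-row key: the same concatenation loop as in Source B
def pvKeyOf (indexes : List Int) (columns : List (List String)) (row : Int) : String :=
  indexes.foldl
    (fun key index => key ++ PySem.List.pyGetD (PySem.List.pyGetD columns index []) row "")
    ""

-- B's adjacent-duplicate scan over the sorted key list (the 'for k in range(1, len(keys))' loop)
def pvAdjDup : List String → Bool
  | a :: b :: t => a == b || pvAdjDup (b :: t)
  | _ => false

-- port of B: collect the keys, sort them, return False on an adjacent duplicate,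
-- else (len(keys) == ROW_LEN)
def is_candidate_key_alt (indexes : List Int) (columns : List (List String)) (ROW_LEN : Int) : Bool :=
  let keys := (PySem.List.pyRange 0 ROW_LEN 1).map (pvKeyOf indexes columns)
  let keys := PySem.List.sorted keys (fun x => x) false
  if pvAdjDup keys then false
  else decide ((keys.length : Int) = ROW_LEN)

-- ===== PRECONDITION & SPEC =====
-- Pre_ excludes exactly the inputs where the Python A raises IndexError: when at
-- least one row is processed (0 < ROW_LEN), every index must pick an existing column
-- and that column must have at least ROW_LEN cells.
def Pre_is_candidate_key (indexes : List Int) (columns : List (List String)) (ROW_LEN : Int) : Prop :=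
  0 < ROW_LEN → ∀ index ∈ indexes,
    PySem.Raise.InRange columns.length index ∧
      ROW_LEN ≤ ((PySem.List.pyGetD columns index []).length : Int)
instance (indexes : List Int) (columns : List (List String)) (ROW_LEN : Int) : Decidable (Pre_is_candidate_key indexes columns ROW_LEN) := by unfold Pre_is_candidate_key; infer_instance
def pvWitness_is_candidate_key : List Int × List (List String) × Int := ([0], [["a", "b"]], 2)
def Spec_is_candidate_key (indexes : List Int) (columns : List (List String)) (ROW_LEN : Int) (out : Bool) : Prop := out = is_candidate_key_alt indexes columns ROW_LEN
instance (indexes : List Int) (columns : List (List String)) (ROW_LEN : Int) (out : Bool) : Decidable (Spec_is_candidate_key indexes columns ROW_LEN out) := by unfold Spec_is_candidate_key; infer_instance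

-- ===== CLAIM (what is proved, stated in full; the proofs are below) =====
def Claim_equal_is_candidate_key : Prop := ∀ (indexes : List Int) (columns : List (List String)) (ROW_LEN : Int), Dom_is_candidate_key indexes columns ROW_LEN → Pre_is_candidate_key indexes columns ROW_LEN → Spec_is_candidate_key indexes columns ROW_LEN (is_candidate_key indexes columns ROW_LEN)

-- ===== LEMMAS AND PROOFS =====

-- the set A builds is set(keys) for B's key list
lemma pv_set_eq_ofList (indexes : List Int) (columns : List (List String)) (ROW_LEN : Int) :
    (PySem.List.pyRange 0 ROW_LEN 1).foldl
      (fun ck row =>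
        PySem.Set.add ck
          (indexes.foldl
            (fun new_column index =>
              new_column ++ PySem.List.pyGetD (PySem.List.pyGetD columns index []) row "")
            ""))
      PySem.Set.empty
    = PySem.Set.ofList ((PySem.List.pyRange 0 ROW_LEN 1).map (pvKeyOf indexes columns)) := by
  rw [PySem.Set.ofList_eq_foldl, ← List.foldl_map]
  rfl

lemma pv_toFinset_ofList {α : Type} [DecidableEq α] (l : List α) :
    (PySem.Set.ofList l).toFinset = l.toFinset := by
  ext x; simp [PySem.Set.mem_ofList]

-- |set(l)| = |l| iff l has no duplicates
lemma pv_len_ofList_eq_iff {α : Type} [DecidableEq α] (l : List α) :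
    ((PySem.Set.ofList l).length = l.length) ↔ l.Nodup := by
  have hcard : (PySem.Set.ofList l).length = l.toFinset.card := by
    rw [← pv_toFinset_ofList l, List.toFinset_card_of_nodup (PySem.Set.nodup_ofList l)]
  rw [hcard]
  exact Multiset.toFinset_card_eq_card_iff_nodup

-- on a weakly sorted list, no adjacent duplicate iff no duplicate at all
lemma pv_adjDup_eq_false_iff (l : List String) (h : l.Pairwise (· ≤ ·)) :
    pvAdjDup l = false ↔ l.Nodup := by
  induction l with
  | nil => simp [pvAdjDup]
  | cons a t ih =>
    cases t with
    | nil => simp [pvAdjDup]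
    | cons b t2 =>
      have hp := List.pairwise_cons.mp h
      have hab : a ≤ b := hp.1 b (by simp)
      have hbt : ∀ x ∈ t2, b ≤ x := (List.pairwise_cons.mp hp.2).1
      rw [show pvAdjDup (a :: b :: t2) = (a == b || pvAdjDup (b :: t2)) from rfl]
      constructor
      · intro hfalse
        rcases Bool.or_eq_false_iff.mp hfalse with ⟨h1, h2⟩
        have hne : a ≠ b := by simpa using h1
        refine List.nodup_cons.mpr ⟨?_, (ih hp.2).mp h2⟩
        intro hmem
        rcases List.mem_cons.mp hmem with h3 | h3
        · exact hne h3
        · exact hne (le_antisymm hab (hbt a h3))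
      · intro hnd
        have hne : a ≠ b := by
          intro he; exact (List.nodup_cons.mp hnd).1 (he ▸ List.mem_cons_self)
        rw [Bool.or_eq_false_iff]
        exact ⟨by simpa using hne, (ih hp.2).mpr (List.nodup_cons.mp hnd).2⟩

lemma pv_main (l : List String) (R : Int) (hR : l = [] ∨ (l.length : Int) = R) :
    (decide (((PySem.Set.ofList l).length : Int) = R))
      = (if pvAdjDup (PySem.List.sorted l (fun x => x) false) then false
         else decide (((PySem.List.sorted l (fun x => x) false).length : Int) = R)) := by
  set s := PySem.List.sorted l (fun x => x) false with hs
  have hperm : s.Perm l := PySem.List.sorted_perm l (fun x => x) false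
  have hlen : s.length = l.length := hperm.length_eq
  have hpw : s.Pairwise (fun a b => a ≤ b) := PySem.List.sorted_pairwise l (fun x => x)
  by_cases hnd : l.Nodup
  · have h1 : (PySem.Set.ofList l).length = l.length := (pv_len_ofList_eq_iff l).mpr hnd
    have h2 : pvAdjDup s = false := (pv_adjDup_eq_false_iff s hpw).mpr (hperm.nodup_iff.mpr hnd)
    rw [h1, h2, if_neg (by simp), hlen]
  · have h2 : pvAdjDup s = true := by
      rcases Bool.eq_false_or_eq_true (pvAdjDup s) with ht | hf
      · exact ht
      · exact absurd (hperm.nodup_iff.mp ((pv_adjDup_eq_false_iff s hpw).mp hf)) hnd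
    rcases hR with hnil | hR
    · exact absurd (hnil ▸ List.nodup_nil) hnd
    rw [h2, if_pos rfl]
    have hlt : (PySem.Set.ofList l).length < l.length :=
      lt_of_le_of_ne (PySem.Set.length_ofList_le l)
        (fun he => hnd ((pv_len_ofList_eq_iff l).mp he))
    simp only [decide_eq_false_iff_not]
    omega

-- ===== VERDICT (by name: the statement is the Claim_ definition above) =====
theorem is_candidate_key_spec : Claim_equal_is_candidate_key := by
  intro indexes columns ROW_LEN _ _
  unfold Spec_is_candidate_key is_candidate_key is_candidate_key_alt
  simp only [pv_set_eq_ofList, PySem.Set.len]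
  set l := (PySem.List.pyRange 0 ROW_LEN 1).map (pvKeyOf indexes columns) with hl
  have hlen : l.length = (ROW_LEN - 0).toNat := by
    rw [hl, List.length_map, PySem.List.length_pyRange_one]
  refine pv_main l ROW_LEN ?_
  by_cases h0 : ROW_LEN ≤ 0
  · exact Or.inl (by rw [hl, PySem.List.pyRange_one_eq_nil h0]; rfl)
  · right; omega
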